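-- pv_equiv track=rewrite | github.com/Oracking/advent-of-code-2023 | solutions/day_12/part_1.py | find_next_match
-- ===== SOURCE A (Python) =====
-- from typing import List, Union
--
-- def find_next_match(input_pattern: str, from_index: int,  target_length: int) -> Union[int, None]:
--     for start_index in range(from_index, len(input_pattern)):
--         sub_pattern_end_index = start_index
--         while sub_pattern_end_index - start_index < target_length and sub_pattern_end_index < len(input_pattern):
--             next_char = input_pattern[sub_pattern_end_index]
--             if char_can_be(next_char, "#"):
--                 sub_pattern_end_index += 1
--             else:
--                 break
--         if sub_pattern_end_index - start_index == target_length: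
--             if sub_pattern_end_index == len(input_pattern) or char_can_be(input_pattern[sub_pattern_end_index], "."):
--                 return start_index
--     return None
--
-- def char_can_be(character, target_character):
--     return character == target_character or character == "?"
-- ===== SOURCE B (Python) =====
-- def find_next_match(input_pattern, from_index, target_length):
--     n = len(input_pattern)
--     # run[i] = length of the maximal run of can-be-'#' chars ('#' or '?') starting at i
--     run = [0]
--     for ch in reversed(input_pattern):
--         run.append(run[-1] + 1 if ch in "#?" else 0)
--     run.reverse()
--     for i in range(from_index, n):
--         if run[i] >= target_length and (i + target_length == n or input_pattern[i + target_length] in ".?"):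
--             return i
--     return None
-- ===== Notes on version B (the rewrite author's own statement) =====
-- stated objective: alternative
-- what changed: replaces the per-start inner while-loop re-scan with a precomputed suffix run-length table built in one backward pass, then a single forward scan with an O(1) test per start
-- outside the precondition, e.g. on find_next_match('?#', -1, 1): A returns -1, B returns 1; on find_next_match('??', 0, -1): A returns None, B returns 0
import Mathlib
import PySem

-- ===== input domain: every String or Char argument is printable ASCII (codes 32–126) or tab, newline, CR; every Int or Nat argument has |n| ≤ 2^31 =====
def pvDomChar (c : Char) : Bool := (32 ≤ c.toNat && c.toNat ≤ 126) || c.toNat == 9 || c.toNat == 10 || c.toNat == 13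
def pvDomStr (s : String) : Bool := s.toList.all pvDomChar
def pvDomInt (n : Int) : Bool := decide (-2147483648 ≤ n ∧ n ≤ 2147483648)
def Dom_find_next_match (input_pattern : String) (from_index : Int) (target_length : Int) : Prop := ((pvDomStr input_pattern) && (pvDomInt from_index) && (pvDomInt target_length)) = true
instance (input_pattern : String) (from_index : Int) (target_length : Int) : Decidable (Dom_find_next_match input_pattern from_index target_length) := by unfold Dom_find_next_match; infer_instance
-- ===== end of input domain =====

-- B replaces A's per-start inner rescan by a precomputed suffix run-length table and a
-- single forward scan with an O(1) test per start (objective: alternative algorithm, same result).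

-- ===== PORT A =====
def charCanBe (character target_character : Char) : Bool :=
  character == target_character || character == '?'

-- the inner `while` loop of A: advances sub_pattern_end_index (e) while it can be '#'
def innerA (cs : List Char) (start target_length e : Int) : Int :=
  if h : e - start < target_length ∧ e < (cs.length : Int) then
    match PySem.List.pyGet? cs e with
    | some next_char => if charCanBe next_char '#' then innerA cs start target_length (e + 1) else e
    | none => e   -- IndexError in Python; unreachable under Pre_
  else e
termination_by ((cs.length : Int) - e).toNat
decreasing_by omega

-- the outer `for start_index in range(from_index, len(...))` loop with early return
def outerA (cs : List Char) (target_length : Int) : List Int → Option Int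
  | [] => none
  | start_index :: rest =>
    let e := innerA cs start_index target_length start_index
    if e - start_index = target_length then
      if e = (cs.length : Int) ∨
          (match PySem.List.pyGet? cs e with
           | some c => charCanBe c '.'
           | none => false) = true then
        some start_index
      else outerA cs target_length rest
    else outerA cs target_length rest

def find_next_match (input_pattern : String) (from_index : Int) (target_length : Int) : Option Int :=
  let cs := input_pattern.toList
  outerA cs target_length (PySem.List.pyRange from_index (cs.length : Int) 1)

-- ===== PORT B =====
-- run.append(run[-1] + 1 if ch in "#?" else 0)
def stepB (acc : List Int) (ch : Char) : List Int :=
  acc ++ [if ch == '#' || ch == '?' then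
            (match PySem.List.pyGet? acc (-1) with | some v => v | none => 0) + 1
          else 0]

-- run = [0]; for ch in reversed(s): run.append(...); run.reverse()
def buildRun (cs : List Char) : List Int :=
  ((cs.reverse).foldl stepB [0]).reverse

-- for i in range(from_index, n): if run[i] >= L and (i+L == n or s[i+L] in ".?"): return i
def scanB (cs : List Char) (run : List Int) (target_length : Int) : List Int → Option Int
  | [] => none
  | i :: rest =>
    if target_length ≤ PySem.List.pyGetD run i 0 ∧
        (i + target_length = (cs.length : Int) ∨
          (match PySem.List.pyGet? cs (i + target_length) with
           | some c => c == '.' || c == '?'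
           | none => false) = true) then
      some i
    else scanB cs run target_length rest

def find_next_match_alt (input_pattern : String) (from_index : Int) (target_length : Int) : Option Int :=
  let cs := input_pattern.toList
  scanB cs (buildRun cs) target_length (PySem.List.pyRange from_index (cs.length : Int) 1)

-- ===== PRECONDITION & SPEC =====
-- Pre_ restricts to the task's natural domain: it excludes negative from_index (where A reads
-- characters through Python negative-index wraparound, or raises IndexError when from_index < -len)
-- and negative target_length with from_index < len (a negative run length: A fruitlessly scans and
-- returns None while B's boundary probe s[i+L] may wrap or raise); the vacuous case from_index ≥ len
-- (both scans are empty) is kept for any target_length.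
def Pre_find_next_match (input_pattern : String) (from_index : Int) (target_length : Int) : Prop :=
  (0 ≤ from_index ∧ 0 ≤ target_length) ∨ (input_pattern.toList.length : Int) ≤ from_index
instance (input_pattern : String) (from_index : Int) (target_length : Int) : Decidable (Pre_find_next_match input_pattern from_index target_length) := by unfold Pre_find_next_match; infer_instance

def pvWitness_find_next_match : String × Int × Int := ("?#?.", 0, 2)

def Spec_find_next_match (input_pattern : String) (from_index : Int) (target_length : Int) (out : Option Int) : Prop := out = find_next_match_alt input_pattern from_index target_length
instance (input_pattern : String) (from_index : Int) (target_length : Int) (out : Option Int) : Decidable (Spec_find_next_match input_pattern from_index target_length out) := by unfold Spec_find_next_match; infer_instance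

-- ===== CLAIM (what is proved, stated in full; the proofs are below) =====
def Claim_equal_find_next_match : Prop := ∀ (input_pattern : String) (from_index : Int) (target_length : Int), Dom_find_next_match input_pattern from_index target_length → Pre_find_next_match input_pattern from_index target_length → Spec_find_next_match input_pattern from_index target_length (find_next_match input_pattern from_index target_length)

-- ===== LEMMAS AND PROOFS =====

-- length of the maximal prefix run of can-be-'#' chars
def runVal : List Char → Int
  | [] => 0
  | c :: t => if charCanBe c '#' then runVal t + 1 else 0

lemma runVal_nonneg (cs : List Char) : 0 ≤ runVal cs := by
  induction cs with
  | nil => simp [runVal]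
  | cons c t ih => simp only [runVal]; split <;> omega

lemma buildRun_eq (cs : List Char) : buildRun cs = cs.tails.map runVal := by
  unfold buildRun
  rw [List.foldl_reverse]
  induction cs with
  | nil => rfl
  | cons c t ih =>
    have hR : List.foldr (fun x y => stepB y x) [0] t = (t.tails.map runVal).reverse := by
      rw [← ih, List.reverse_reverse]
    have hhead : (t.tails.map runVal).head? = some (runVal t) := by cases t <;> rfl
    rw [List.foldr_cons, hR]
    unfold stepB
    rw [PySem.List.pyGet?_neg_one, List.getLast?_reverse, hhead]
    have hcc : charCanBe c '#' = (c == '#' || c == '?') := rfl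
    simp only [List.reverse_append, List.reverse_reverse, List.reverse_cons, List.reverse_nil,
      List.nil_append, List.cons_append, List.tails_cons, List.map_cons]
    have hrv : runVal (c :: t) = if (c == '#' || c == '?') = true then runVal t + 1 else 0 := by
      simp only [runVal, hcc]
    rw [hrv]

lemma buildRun_getD (cs : List Char) (i : Int) (h0 : 0 ≤ i) (h1 : i.toNat ≤ cs.length) :
    PySem.List.pyGetD (buildRun cs) i 0 = runVal (cs.drop i.toNat) := by
  rw [buildRun_eq]
  have hlt : i < ((cs.tails.map runVal).length : Int) := by
    rw [List.length_map, List.length_tails]; omega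
  rw [PySem.List.pyGetD_eq_getElem _ 0 h0 hlt]
  have hlt' : i.toNat < cs.tails.length := by rw [List.length_tails]; omega
  rw [List.getElem_map, List.getElem_tails]

lemma innerA_eq (cs : List Char) (L : Int) (hL : 0 ≤ L) :
    ∀ e start : Int, 0 ≤ e → e ≤ (cs.length : Int) → start ≤ e → e - start ≤ L →
      innerA cs start L e = start + min L ((e - start) + runVal (cs.drop e.toNat)) := by
  intro e
  induction hmeas : ((cs.length : Int) - e).toNat using Nat.strong_induction_on generalizing e with
  | _ m ih =>
  intro start h0 hlen hse hL'
  rw [innerA]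
  by_cases hcond : e - start < L ∧ e < (cs.length : Int)
  · rw [dif_pos hcond]
    have hidx : e.toNat < cs.length := by omega
    simp only [PySem.List.pyGet?_eq_some_getElem cs h0 hcond.2]
    have hdrop : cs.drop e.toNat = cs[e.toNat] :: cs.drop (e.toNat + 1) := by
      exact (List.getElem_cons_drop hidx).symm
    by_cases hc : charCanBe cs[e.toNat] '#' = true
    · rw [if_pos hc]
      have hstep : runVal (cs.drop e.toNat) = runVal (cs.drop ((e + 1).toNat)) + 1 := by
        have h1 : (e + 1).toNat = e.toNat + 1 := by omega
        rw [hdrop, h1]; simp only [runVal]; rw [if_pos hc]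
      rw [ih (((cs.length : Int) - (e+1)).toNat) (by omega) (e+1) rfl start (by omega) (by omega) (by omega) (by omega), hstep]
      omega
    · rw [if_neg hc]
      have hstep : runVal (cs.drop e.toNat) = 0 := by
        rw [hdrop]; simp only [runVal]; rw [if_neg hc]
      rw [hstep]
      omega
  · rw [dif_neg hcond]
    push_neg at hcond
    by_cases hlt : e - start < L
    · have he : e = (cs.length : Int) := le_antisymm hlen (hcond hlt)
      have : cs.drop e.toNat = [] := by
        apply List.drop_eq_nil_of_le; omega
      rw [this]
      simp only [runVal]
      omega
    · have hrv := runVal_nonneg (cs.drop e.toNat)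
      omega

lemma scan_eq (cs : List Char) (L : Int) (hL : 0 ≤ L) :
    ∀ l : List Int, (∀ i ∈ l, 0 ≤ i ∧ i < (cs.length : Int)) →
      outerA cs L l = scanB cs (buildRun cs) L l := by
  intro l hl
  induction l with
  | nil => rfl
  | cons i rest ih =>
    have hi := hl i (by simp)
    have hrest : ∀ j ∈ rest, 0 ≤ j ∧ j < (cs.length : Int) := fun j hj => hl j (by simp [hj])
    have hrv := runVal_nonneg (cs.drop i.toNat)
    rw [outerA, scanB]
    rw [innerA_eq cs L hL i i hi.1 (by omega) le_rfl (by omega)]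
    rw [buildRun_getD cs i hi.1 (by omega)]
    simp only [charCanBe]
    by_cases hge : L ≤ runVal (cs.drop i.toNat)
    · have h1 : i + min L (i - i + runVal (cs.drop i.toNat)) - i = L := by omega
      have h2 : i + min L (i - i + runVal (cs.drop i.toNat)) = i + L := by omega
      rw [if_pos h1, h2]
      by_cases hb : i + L = (cs.length : Int) ∨
          (match PySem.List.pyGet? cs (i + L) with
           | some c => c == '.' || c == '?'
           | none => false) = true
      · rw [if_pos hb, if_pos ⟨hge, hb⟩]
      · rw [if_neg hb, if_neg (by simp only [hge, true_and]; exact hb), ih hrest]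
    · have h1 : ¬ (i + min L (i - i + runVal (cs.drop i.toNat)) - i = L) := by omega
      rw [if_neg h1, if_neg (by intro hcon; exact hge hcon.1), ih hrest]

-- ===== VERDICT (by name: the statement is the Claim_ definition above) =====
theorem find_next_match_spec : Claim_equal_find_next_match := by
  intro s from_index L _hdom hpre
  unfold Spec_find_next_match find_next_match find_next_match_alt
  rcases hpre with ⟨hf, hL⟩ | hge
  · exact scan_eq s.toList L hL _
      (fun i hi => by
        rw [PySem.List.mem_pyRange_one] at hi
        exact ⟨le_trans hf hi.1, hi.2⟩)
  · show outerA s.toList L (PySem.List.pyRange from_index (s.toList.length : Int) 1) =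
        scanB s.toList (buildRun s.toList) L (PySem.List.pyRange from_index (s.toList.length : Int) 1)
    rw [PySem.List.pyRange_one_eq_nil hge]
    rfl
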